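-- pv_equiv track=rewrite | github.com/ViniciusVon/recursive-scrap-a-algo-2026-01 | src/notifier.py | montar_corpo_alteracao
-- ===== SOURCE A (Python) =====
-- def montar_corpo_alteracao(url: str, antes: dict, depois: dict) -> str:
--     """Monta o corpo do e-mail com as alterações detectadas.
--
--     Complexidade: O(n log n) — a construção dos sets é O(n), a diferença
--     simétrica é O(n), e os `sorted(novos)` / `sorted(removidos)` custam
--     O(k log k), dominando o total.
--     """
--     linhas = [
--         "Alterações detectadas no monitoramento!",
--         f"\nURL: {url}\n",
--     ]
--
--     numeros_antes = set(antes.get("numeros", []))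
--     numeros_depois = set(depois.get("numeros", []))
--
--     novos = numeros_depois - numeros_antes
--     removidos = numeros_antes - numeros_depois
--
--     if novos:
--         linhas.append("Valores NOVOS:")
--         for v in sorted(novos):
--             linhas.append(f"  + {v}")
--
--     if removidos:
--         linhas.append("Valores REMOVIDOS:")
--         for v in sorted(removidos):
--             linhas.append(f"  - {v}")
--
--     if not novos and not removidos:
--         linhas.append("Houve alteração na ordem ou frequência dos valores numéricos.")
--
--     linhas.append(f"\nAntes: {len(antes.get('numeros', []))} valores")
--     linhas.append(f"Depois: {len(depois.get('numeros', []))} valores")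
--
--     return "\n".join(linhas)
-- ===== SOURCE B (Python) =====
-- def montar_corpo_alteracao(url: str, antes: dict, depois: dict) -> str:
--     """Same e-mail body, but novos/removidos are classified by a single
--     two-pointer merge over the two sorted deduplicated lists (no set
--     differences, no second sort)."""
--     lista_antes = antes.get("numeros", [])
--     lista_depois = depois.get("numeros", [])
--     a = sorted(set(lista_antes))
--     d = sorted(set(lista_depois))
--     novos, removidos = [], []
--     i = j = 0
--     while i < len(a) and j < len(d):
--         if a[i] < d[j]:
--             removidos.append(a[i]); i += 1
--         elif d[j] < a[i]:
--             novos.append(d[j]); j += 1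
--         else:
--             i += 1; j += 1
--     removidos.extend(a[i:])
--     novos.extend(d[j:])
--
--     linhas = [
--         "Alterações detectadas no monitoramento!",
--         f"\nURL: {url}\n",
--     ]
--     if novos:
--         linhas.append("Valores NOVOS:")
--         for v in novos:
--             linhas.append(f"  + {v}")
--     if removidos:
--         linhas.append("Valores REMOVIDOS:")
--         for v in removidos:
--             linhas.append(f"  - {v}")
--     if not novos and not removidos:
--         linhas.append("Houve alteração na ordem ou frequência dos valores numéricos.")
--     linhas.append(f"\nAntes: {len(lista_antes)} valores")
--     linhas.append(f"Depois: {len(lista_depois)} valores")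
--     return "\n".join(linhas)
-- ===== Notes on version B (the rewrite author's own statement) =====
-- stated objective: alternative
-- what changed: Replaces the two set differences plus two sorts of the differences by one two-pointer merge over the two sorted deduplicated input lists, classifying each value as NOVO/REMOVIDO/unchanged in a single simultaneous walk.
import Mathlib
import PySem

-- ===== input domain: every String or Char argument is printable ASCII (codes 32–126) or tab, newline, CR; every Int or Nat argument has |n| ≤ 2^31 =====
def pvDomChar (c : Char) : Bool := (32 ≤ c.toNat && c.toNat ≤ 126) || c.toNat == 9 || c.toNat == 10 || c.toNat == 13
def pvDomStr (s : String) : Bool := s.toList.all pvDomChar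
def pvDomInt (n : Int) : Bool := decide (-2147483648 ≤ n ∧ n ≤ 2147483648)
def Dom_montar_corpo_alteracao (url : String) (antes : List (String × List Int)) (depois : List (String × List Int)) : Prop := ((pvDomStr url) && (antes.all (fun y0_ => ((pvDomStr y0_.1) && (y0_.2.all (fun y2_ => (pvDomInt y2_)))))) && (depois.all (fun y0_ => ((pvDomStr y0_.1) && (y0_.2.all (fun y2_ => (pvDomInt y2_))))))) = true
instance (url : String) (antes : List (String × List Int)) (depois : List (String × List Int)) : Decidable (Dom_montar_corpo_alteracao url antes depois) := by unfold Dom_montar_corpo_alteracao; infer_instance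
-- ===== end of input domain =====

-- B classifies new/removed values by a two-pointer merge of the two sorted deduplicated
-- lists instead of A's two set differences each sorted separately (alternative decomposition).

-- ===== PORT A =====
def montar_corpo_alteracao (url : String) (antes : List (String × List Int)) (depois : List (String × List Int)) : String :=
  let linhas : List String :=
    ["Alterações detectadas no monitoramento!", "\nURL: " ++ url ++ "\n"]
  let numeros_antes : PySem.Set Int := PySem.Set.ofList (PySem.Dict.getD (PySem.Dict.ofList antes) "numeros" [])
  let numeros_depois : PySem.Set Int := PySem.Set.ofList (PySem.Dict.getD (PySem.Dict.ofList depois) "numeros" [])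
  let novos := PySem.Set.diff numeros_depois numeros_antes
  let removidos := PySem.Set.diff numeros_antes numeros_depois
  let linhas :=
    if novos ≠ [] then
      linhas ++ ["Valores NOVOS:"] ++
        (PySem.List.sorted novos (fun v => v) false).map (fun v => "  + " ++ PySem.Int.toStr v)
    else linhas
  let linhas :=
    if removidos ≠ [] then
      linhas ++ ["Valores REMOVIDOS:"] ++
        (PySem.List.sorted removidos (fun v => v) false).map (fun v => "  - " ++ PySem.Int.toStr v)
    else linhas
  let linhas :=
    if novos = [] ∧ removidos = [] then
      linhas ++ ["Houve alteração na ordem ou frequência dos valores numéricos."]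
    else linhas
  let linhas := linhas ++
    ["\nAntes: " ++ PySem.Int.toStr ((PySem.Dict.getD (PySem.Dict.ofList antes) "numeros" []).length : Int) ++ " valores",
     "Depois: " ++ PySem.Int.toStr ((PySem.Dict.getD (PySem.Dict.ofList depois) "numeros" []).length : Int) ++ " valores"]
  PySem.Str.join "\n" linhas

-- ===== PORT B =====
-- two-pointer merge of two sorted lists: (novos, removidos)
def pvMergeDiff : List Int → List Int → List Int × List Int
  | [], d => (d, [])
  | x :: a, [] => ([], x :: a)
  | x :: a, y :: d =>
    if x < y then
      let p := pvMergeDiff a (y :: d); (p.1, x :: p.2)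
    else if y < x then
      let p := pvMergeDiff (x :: a) d; (y :: p.1, p.2)
    else
      pvMergeDiff a d
termination_by a d => a.length + d.length

def montar_corpo_alteracao_alt (url : String) (antes : List (String × List Int)) (depois : List (String × List Int)) : String :=
  let lista_antes := PySem.Dict.getD (PySem.Dict.ofList antes) "numeros" []
  let lista_depois := PySem.Dict.getD (PySem.Dict.ofList depois) "numeros" []
  let a := PySem.List.sorted (PySem.Set.ofList lista_antes) (fun v => v) false
  let d := PySem.List.sorted (PySem.Set.ofList lista_depois) (fun v => v) false
  let nr := pvMergeDiff a d
  let novos := nr.1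
  let removidos := nr.2
  let linhas : List String :=
    ["Alterações detectadas no monitoramento!", "\nURL: " ++ url ++ "\n"]
  let linhas :=
    if novos ≠ [] then
      linhas ++ ["Valores NOVOS:"] ++ novos.map (fun v => "  + " ++ PySem.Int.toStr v)
    else linhas
  let linhas :=
    if removidos ≠ [] then
      linhas ++ ["Valores REMOVIDOS:"] ++ removidos.map (fun v => "  - " ++ PySem.Int.toStr v)
    else linhas
  let linhas :=
    if novos = [] ∧ removidos = [] then
      linhas ++ ["Houve alteração na ordem ou frequência dos valores numéricos."]
    else linhas
  let linhas := linhas ++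
    ["\nAntes: " ++ PySem.Int.toStr (lista_antes.length : Int) ++ " valores",
     "Depois: " ++ PySem.Int.toStr (lista_depois.length : Int) ++ " valores"]
  PySem.Str.join "\n" linhas

-- ===== PRECONDITION & SPEC =====
def Spec_montar_corpo_alteracao (url : String) (antes : List (String × List Int)) (depois : List (String × List Int)) (out : String) : Prop := out = montar_corpo_alteracao_alt url antes depois
instance (url : String) (antes : List (String × List Int)) (depois : List (String × List Int)) (out : String) : Decidable (Spec_montar_corpo_alteracao url antes depois out) := by unfold Spec_montar_corpo_alteracao; infer_instance

-- ===== CLAIM (what is proved, stated in full; the proofs are below) =====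
def Claim_equal_montar_corpo_alteracao : Prop := ∀ (url : String) (antes : List (String × List Int)) (depois : List (String × List Int)), Dom_montar_corpo_alteracao url antes depois → Spec_montar_corpo_alteracao url antes depois (montar_corpo_alteracao url antes depois)

-- ===== LEMMAS AND PROOFS =====

-- the merge classifies exactly: novos = d-side values not in a, removidos = a-side values not in d
theorem pvMergeDiff_eq (a : List Int) : ∀ d : List Int, a.Pairwise (· < ·) → d.Pairwise (· < ·) →
    pvMergeDiff a d =
      (d.filter (fun y => !(decide (y ∈ a))), a.filter (fun x => !(decide (x ∈ d)))) := by
  induction a with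
  | nil => intro d _ _; simp [pvMergeDiff]
  | cons x a iha =>
    intro d
    induction d with
    | nil => intro _ _; simp [pvMergeDiff]
    | cons y d ihd =>
      intro ha hd
      have hay : ∀ z ∈ a, x < z := (List.pairwise_cons.mp ha).1
      have hdy : ∀ z ∈ d, y < z := (List.pairwise_cons.mp hd).1
      rcases lt_trichotomy x y with h | h | h
      · rw [pvMergeDiff, if_pos h]
        rw [iha (y :: d) (List.pairwise_cons.mp ha).2 hd]
        dsimp only
        simp only [Prod.mk.injEq]
        have hxd : ∀ z ∈ d, x < z := fun z hz => lt_trans h (hdy z hz)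
        refine ⟨List.filter_congr ?_, ?_⟩
        · intro z hz
          have hxz : x < z := by
            rcases List.mem_cons.mp hz with rfl | hz
            · exact h
            · exact hxd z hz
          have : z ≠ x := fun he => absurd (he ▸ hxz) (lt_irrefl z)
          simp [this]
        · rw [List.filter_cons]
          rw [if_pos (by
            simp only [List.mem_cons, Bool.not_eq_true', decide_eq_false_iff_not, not_or]
            exact ⟨fun he => absurd (he ▸ h) (lt_irrefl x),
                   fun hx => absurd (hxd x hx) (lt_irrefl x)⟩)]
      · subst h
        rw [pvMergeDiff, if_neg (lt_irrefl x), if_neg (lt_irrefl x)]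
        rw [iha d (List.pairwise_cons.mp ha).2 (List.pairwise_cons.mp hd).2]
        simp only [Prod.mk.injEq]
        have e1 : List.filter (fun z => !(decide (z ∈ x :: a))) (x :: d)
            = List.filter (fun z => !(decide (z ∈ a))) d := by
          rw [List.filter_cons, if_neg (by simp)]
          apply List.filter_congr
          intro z hz
          have : z ≠ x := fun he => absurd (he ▸ hdy z hz) (lt_irrefl z)
          simp [this]
        have e2 : List.filter (fun z => !(decide (z ∈ x :: d))) (x :: a)
            = List.filter (fun z => !(decide (z ∈ d))) a := by
          rw [List.filter_cons, if_neg (by simp)]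
          apply List.filter_congr
          intro z hz
          have : z ≠ x := fun he => absurd (he ▸ hay z hz) (lt_irrefl z)
          simp [this]
        exact ⟨e1.symm, e2.symm⟩
      · rw [pvMergeDiff, if_neg (by omega : ¬ x < y), if_pos h]
        rw [ihd ha (List.pairwise_cons.mp hd).2]
        dsimp only
        simp only [Prod.mk.injEq]
        have hya : ∀ z ∈ a, y < z := fun z hz => lt_trans h (hay z hz)
        refine ⟨?_, List.filter_congr ?_⟩
        · rw [List.filter_cons]
          rw [if_pos (by
            simp only [List.mem_cons, Bool.not_eq_true', decide_eq_false_iff_not, not_or]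
            exact ⟨fun he => absurd (he ▸ h) (lt_irrefl y),
                   fun hy => absurd (hya y hy) (lt_irrefl y)⟩)]
        · intro z hz
          have hyz : y < z := by
            rcases List.mem_cons.mp hz with rfl | hz
            · exact h
            · exact hya z hz
          have : z ≠ y := fun he => absurd (he ▸ hyz) (lt_irrefl z)
          simp [this]

-- sorted set difference = filter of the sorted deduplicated list
theorem sorted_diff_eq (xs ys : List Int) :
    PySem.List.sorted (PySem.Set.diff (PySem.Set.ofList ys) (PySem.Set.ofList xs)) (fun v => v) false
      = (PySem.List.sorted (PySem.Set.ofList ys) (fun v => v) false).filter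
          (fun y => !(decide (y ∈ PySem.List.sorted (PySem.Set.ofList xs) (fun v => v) false))) := by
  apply PySem.List.sorted_eq_of_perm_of_pairwise_lt
  · have hnd : (PySem.List.sorted (PySem.Set.ofList ys) (fun v => v) false).Nodup :=
      (PySem.List.sorted_perm _ _ _).nodup_iff.mpr (PySem.Set.nodup_ofList ys)
    apply (List.perm_ext_iff_of_nodup (hnd.filter _)
      (PySem.Set.nodup_diff _ _ (PySem.Set.nodup_ofList ys))).mpr
    intro z
    simp only [List.mem_filter, PySem.List.mem_sorted, PySem.Set.mem_diff,
      Bool.not_eq_eq_eq_not, Bool.not_true, decide_eq_false_iff_not]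
  · exact (PySem.List.sorted_ofList_pairwise_lt ys).filter _

-- ===== VERDICT (by name: the statement is the Claim_ definition above) =====
theorem montar_corpo_alteracao_spec : Claim_equal_montar_corpo_alteracao := by
  intro url antes depois _
  unfold Spec_montar_corpo_alteracao montar_corpo_alteracao montar_corpo_alteracao_alt
  set la := PySem.Dict.getD (PySem.Dict.ofList antes) "numeros" [] with hla
  set ld := PySem.Dict.getD (PySem.Dict.ofList depois) "numeros" [] with hld
  have hm := pvMergeDiff_eq
    (PySem.List.sorted (PySem.Set.ofList la) (fun v => v) false)
    (PySem.List.sorted (PySem.Set.ofList ld) (fun v => v) false)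
    (PySem.List.sorted_ofList_pairwise_lt la)
    (PySem.List.sorted_ofList_pairwise_lt ld)
  have hN := sorted_diff_eq la ld
  have hR := sorted_diff_eq ld la
  have hNe : PySem.Set.diff (PySem.Set.ofList ld) (PySem.Set.ofList la) = [] ↔
      (pvMergeDiff (PySem.List.sorted (PySem.Set.ofList la) (fun v => v) false)
        (PySem.List.sorted (PySem.Set.ofList ld) (fun v => v) false)).1 = [] := by
    rw [hm]; rw [← PySem.List.sorted_eq_nil_iff
      (xs := PySem.Set.diff (PySem.Set.ofList ld) (PySem.Set.ofList la)) (key := fun v => v) (rev := false)]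
    rw [hN]
  have hRe : PySem.Set.diff (PySem.Set.ofList la) (PySem.Set.ofList ld) = [] ↔
      (pvMergeDiff (PySem.List.sorted (PySem.Set.ofList la) (fun v => v) false)
        (PySem.List.sorted (PySem.Set.ofList ld) (fun v => v) false)).2 = [] := by
    rw [hm]; rw [← PySem.List.sorted_eq_nil_iff
      (xs := PySem.Set.diff (PySem.Set.ofList la) (PySem.Set.ofList ld)) (key := fun v => v) (rev := false)]
    rw [hR]
  simp only []
  rw [hm] at hNe hRe ⊢
  rw [hN, hR]
  by_cases h1 : PySem.Set.diff (PySem.Set.ofList ld) (PySem.Set.ofList la) = [] <;>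
  by_cases h2 : PySem.Set.diff (PySem.Set.ofList la) (PySem.Set.ofList ld) = [] <;>
    simp_all
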